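-- pv_equiv track=rewrite | github.com/schroeder-g/project_euler | src/pe_019_counting_sundays.py | is_first_day_of_month
-- ===== SOURCE A (Python) =====
-- from collections import OrderedDict
--
-- days_in_month_map = OrderedDict(
--     jan=31,
--     feb=28,
--     mar=31,
--     apr=30,
--     may=31,
--     jun=30,
--     july=31,
--     aug=31,
--     sep=30,
--     oct=31,
--     nov=30,
--     dec=31,
-- )
--
-- def is_leap_year(y):
--     return (y % 4 == 0 and not y % 100 == 0) or y % 400 == 0
--
-- def is_first_day_of_month(num, y):
--     for v in days_in_month_map.values():
--         if num == 1:
--             return True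
--         elif num < 1:
--             return False
--
--         num -= v
--         if v == 28 and is_leap_year(y):
--             num -= 1
--
--     return False
-- ===== SOURCE B (Python) =====
-- from itertools import accumulate
--
-- def is_leap_year(y):
--     return (y % 4 == 0 and not y % 100 == 0) or y % 400 == 0
--
-- def is_first_day_of_month(num, y):
--     lengths = [31, 29 if is_leap_year(y) else 28, 31, 30, 31, 30, 31, 31, 30, 31, 30, 31]
--     starts = list(accumulate([1] + lengths[:-1]))
--     return num in starts
-- ===== Notes on version B (the rewrite author's own statement) =====
-- stated objective: simpler
-- what changed: Replaced the interleaved subtract-and-compare early-exit loop with a prefix-sum table of the 12 month-start offsets (itertools.accumulate, leap-adjusted February) followed by a single membership test.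
import Mathlib
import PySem

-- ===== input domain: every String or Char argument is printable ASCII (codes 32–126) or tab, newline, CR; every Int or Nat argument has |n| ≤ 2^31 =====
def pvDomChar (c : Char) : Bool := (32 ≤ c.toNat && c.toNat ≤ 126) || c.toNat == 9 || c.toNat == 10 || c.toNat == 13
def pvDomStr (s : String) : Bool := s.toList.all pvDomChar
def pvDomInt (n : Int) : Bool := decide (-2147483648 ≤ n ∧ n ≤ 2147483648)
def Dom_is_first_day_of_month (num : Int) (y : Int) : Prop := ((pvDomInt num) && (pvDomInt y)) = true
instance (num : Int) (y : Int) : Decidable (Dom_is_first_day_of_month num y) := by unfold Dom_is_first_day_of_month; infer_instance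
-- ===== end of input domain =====

-- B replaces A's subtract-and-compare early-exit loop by a prefix-sum table of month starts plus one membership test (objective: simpler).

-- shared helper: is_leap_year, identical in both Python sources
def is_leap_year_py (y : Int) : Bool :=
  (PySem.Int.mod y 4 == 0 && !(PySem.Int.mod y 100 == 0)) || PySem.Int.mod y 400 == 0

-- ===== PORT A =====
def days_in_month_values : List Int := [31, 28, 31, 30, 31, 30, 31, 31, 30, 31, 30, 31]

def pvALoop (num : Int) (y : Int) : List Int → Bool
  | [] => false
  | v :: rest =>
    if num == 1 then true
    else if num < 1 then false
    else
      let num1 := num - v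
      let num2 := if v == 28 && is_leap_year_py y then num1 - 1 else num1
      pvALoop num2 y rest

def is_first_day_of_month (num : Int) (y : Int) : Bool :=
  pvALoop num y days_in_month_values

-- ===== PORT B =====
-- itertools.accumulate ported as a running-sum recursion
def pvAccum (acc : Int) : List Int → List Int
  | [] => []
  | x :: rest => (acc + x) :: pvAccum (acc + x) rest

def is_first_day_of_month_alt (num : Int) (y : Int) : Bool :=
  let lengths : List Int :=
    [31, if is_leap_year_py y then 29 else 28, 31, 30, 31, 30, 31, 31, 30, 31, 30, 31]
  let starts := pvAccum 0 (1 :: lengths.dropLast)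
  starts.contains num

-- ===== PRECONDITION & SPEC =====
def Spec_is_first_day_of_month (num : Int) (y : Int) (out : Bool) : Prop := out = is_first_day_of_month_alt num y
instance (num : Int) (y : Int) (out : Bool) : Decidable (Spec_is_first_day_of_month num y out) := by unfold Spec_is_first_day_of_month; infer_instance

-- ===== CLAIM (what is proved, stated in full; the proofs are below) =====
def Claim_equal_is_first_day_of_month : Prop := ∀ (num : Int) (y : Int), Dom_is_first_day_of_month num y → Spec_is_first_day_of_month num y (is_first_day_of_month num y)

-- ===== LEMMAS AND PROOFS =====

-- ===== VERDICT (by name: the statement is the Claim_ definition above) =====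
theorem is_first_day_of_month_spec : Claim_equal_is_first_day_of_month := by
  intro num y _
  unfold Spec_is_first_day_of_month is_first_day_of_month is_first_day_of_month_alt
  rw [Bool.eq_iff_iff]
  by_cases hl : is_leap_year_py y = true <;>
    simp [hl, days_in_month_values, pvALoop, pvAccum] <;> omega
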